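-- pv_equiv track=rewrite | github.com/rafsaf/architekturaheleny.pl | template.py | build_category_filters
-- ===== SOURCE A (Python) =====
-- CATEGORY_LABELS = {
--     "all": "Wszystkie",
--     "individual": "Autorskie",
--     "team": "Zespołowe",
--     "bachelors_thesis": "Praca inżynierska",
--     "masters_thesis": "Praca magisterska",
-- }
--
-- CATEGORY_FILTERS = [
--     {"key": key, "label": label}
--     for key in (
--         "all",
--         "individual",
--         "team",
--         "bachelors_thesis",
--         "masters_thesis",
--     )
--     if (label := str(CATEGORY_LABELS.get(key) or "").strip())
-- ]
--
-- def build_category_filters(projects: list[dict]) -> list[dict]: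
--     active_categories = {
--         category
--         for project in projects
--         for category in project.get("categories", [])
--         if category
--     }
--
--     filters: list[dict] = [{"key": "all", "label": CATEGORY_LABELS["all"]}]
--     for item in CATEGORY_FILTERS:
--         key = item["key"]
--         if key == "all":
--             continue
--         if key not in active_categories:
--             continue
--         filters.append(item)
--
--     return filters
-- ===== SOURCE B (Python) =====
-- CATEGORY_LABELS = {
--     "all": "Wszystkie",
--     "individual": "Autorskie",
--     "team": "Zespołowe",
--     "bachelors_thesis": "Praca inżynierska",
--     "masters_thesis": "Praca magisterska",
-- }
--
-- CATEGORY_FILTERS = [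
--     {"key": key, "label": label}
--     for key in (
--         "all",
--         "individual",
--         "team",
--         "bachelors_thesis",
--         "masters_thesis",
--     )
--     if (label := str(CATEGORY_LABELS.get(key) or "").strip())
-- ]
--
--
-- def build_category_filters(projects: list[dict]) -> list[dict]:
--     # No precomputed set of active categories: scan the projects afresh per key.
--     def is_active(key):
--         return any(key in project.get("categories", []) for project in projects)
--
--     return [{"key": "all", "label": CATEGORY_LABELS["all"]}] + [
--         item
--         for item in CATEGORY_FILTERS
--         if item["key"] != "all" and is_active(item["key"])
--     ]
-- ===== Notes on version B (the rewrite author's own statement) =====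
-- stated objective: alternative
-- what changed: B drops A's precomputed set of active categories and instead, for each non-'all' filter key, scans the projects afresh with any(...), building the result as one unconditional 'all' entry plus a list comprehension over CATEGORY_FILTERS.
import Mathlib
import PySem

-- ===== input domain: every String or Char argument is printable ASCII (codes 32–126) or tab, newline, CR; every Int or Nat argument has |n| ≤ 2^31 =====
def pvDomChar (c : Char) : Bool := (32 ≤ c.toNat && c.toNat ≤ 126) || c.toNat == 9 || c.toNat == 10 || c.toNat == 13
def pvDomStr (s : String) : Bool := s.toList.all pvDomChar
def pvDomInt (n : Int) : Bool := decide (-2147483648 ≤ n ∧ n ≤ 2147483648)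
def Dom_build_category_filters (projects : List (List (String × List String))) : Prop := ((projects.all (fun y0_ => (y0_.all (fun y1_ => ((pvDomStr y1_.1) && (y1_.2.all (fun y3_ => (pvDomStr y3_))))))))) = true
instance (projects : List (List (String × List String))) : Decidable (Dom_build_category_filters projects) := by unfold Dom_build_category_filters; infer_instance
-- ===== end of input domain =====

-- B drops A's precomputed active-category set and instead scans the projects afresh
-- per filter key (alternative decomposition; not claimed faster).

-- ===== PORT A =====
-- module constant CATEGORY_LABELS
def pvCatLabels : PySem.Dict String String :=
  PySem.Dict.ofList [("all", "Wszystkie"), ("individual", "Autorskie"),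
    ("team", "Zespołowe"), ("bachelors_thesis", "Praca inżynierska"),
    ("masters_thesis", "Praca magisterska")]

-- module constant CATEGORY_FILTERS (each dict as an assoc list)
-- `CATEGORY_LABELS.get(key) or ""` ported as `(get? key).getD ""` (exact: no falsy non-missing values occur)
def pvCatFilters : List (List (String × String)) :=
  ["all", "individual", "team", "bachelors_thesis", "masters_thesis"].foldl
    (fun acc key =>
      let label := PySem.Str.strip ((pvCatLabels.get? key).getD "")
      if label ≠ "" then acc ++ [[("key", key), ("label", label)]] else acc) []

def build_category_filters (projects : List (List (String × List String))) : List (List (String × String)) :=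
  let active : PySem.Set String :=
    projects.foldl (fun s p =>
      ((PySem.Dict.mk p).getD "categories" []).foldl
        (fun s c => if c ≠ "" then s.add c else s) s)
      PySem.Set.empty
  -- CATEGORY_LABELS["all"] : the key is present in the module constant, so getD "" is exact here
  let filters : List (List (String × String)) := [[("key", "all"), ("label", (pvCatLabels.get? "all").getD "")]]
  pvCatFilters.foldl (fun filters item =>
    let key := ((PySem.Dict.mk item).get? "key").getD ""
    if key == "all" then filters
    else if !(active.contains key) then filters
    else filters ++ [item]) filters

-- ===== PORT B =====
def pvIsActive (projects : List (List (String × List String))) (key : String) : Bool :=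
  projects.any (fun p => ((PySem.Dict.mk p).getD "categories" []).contains key)

def build_category_filters_alt (projects : List (List (String × List String))) : List (List (String × String)) :=
  [[("key", "all"), ("label", (pvCatLabels.get? "all").getD "")]] ++
    pvCatFilters.filter (fun item =>
      let key := ((PySem.Dict.mk item).get? "key").getD ""
      key != "all" && pvIsActive projects key)

-- ===== PRECONDITION & SPEC =====
def Spec_build_category_filters (projects : List (List (String × List String))) (out : List (List (String × String))) : Prop := out = build_category_filters_alt projects
instance (projects : List (List (String × List String))) (out : List (List (String × String))) : Decidable (Spec_build_category_filters projects out) := by unfold Spec_build_category_filters; infer_instance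

-- ===== CLAIM (what is proved, stated in full; the proofs are below) =====
def Claim_equal_build_category_filters : Prop := ∀ (projects : List (List (String × List String))), Dom_build_category_filters projects → Spec_build_category_filters projects (build_category_filters projects)

-- ===== LEMMAS AND PROOFS =====

theorem pv_key (k l : String) :
    ((PySem.Dict.mk [("key", k), ("label", l)]).get? "key").getD "" = k := by
  simp [PySem.Dict.get?_mk_cons]

theorem pvCatFilters_eq : pvCatFilters = [[("key", "all"), ("label", "Wszystkie")],
    [("key", "individual"), ("label", "Autorskie")],
    [("key", "team"), ("label", "Zespołowe")],
    [("key", "bachelors_thesis"), ("label", "Praca inżynierska")],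
    [("key", "masters_thesis"), ("label", "Praca magisterska")]] := by decide

theorem pv_inner_mem (cats : List String) (s : PySem.Set String) (k : String) :
    k ∈ cats.foldl (fun s c => if c ≠ "" then s.add c else s) s ↔
      k ∈ s ∨ (k ≠ "" ∧ k ∈ cats) := by
  induction cats generalizing s with
  | nil => simp
  | cons c cs ih =>
    simp only [List.foldl_cons]
    by_cases hc : c = ""
    · subst hc
      simp only [ne_eq, not_true_eq_false, if_false, ih, List.mem_cons]
      rcases eq_or_ne k "" with rfl | hk
      · simp
      · simp [hk]
    · simp only [ne_eq, hc, not_false_eq_true, if_true, ih, PySem.Set.mem_add, List.mem_cons]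
      rcases eq_or_ne k "" with rfl | hk
      · simp [Ne.symm hc]
      · simp only [hk, not_false_eq_true, true_and]
        tauto

theorem pv_outer_mem (projects : List (List (String × List String))) (s : PySem.Set String) (k : String) :
    k ∈ projects.foldl (fun s p =>
        ((PySem.Dict.mk p).getD "categories" []).foldl
          (fun s c => if c ≠ "" then s.add c else s) s) s ↔
      k ∈ s ∨ (k ≠ "" ∧ ∃ p ∈ projects, k ∈ (PySem.Dict.mk p).getD "categories" []) := by
  induction projects generalizing s with
  | nil => simp
  | cons p ps ih =>
    simp only [List.foldl_cons, ih, pv_inner_mem, List.mem_cons]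
    aesop

theorem pv_active (projects : List (List (String × List String))) (k : String) (hk : k ≠ "") :
    PySem.Set.contains (projects.foldl (fun s p =>
        ((PySem.Dict.mk p).getD "categories" []).foldl
          (fun s c => if c ≠ "" then s.add c else s) s) PySem.Set.empty) k
      = pvIsActive projects k := by
  rw [Bool.eq_iff_iff]
  simp only [PySem.Set.contains]
  rw [List.contains_iff_mem]
  rw [pv_outer_mem]
  simp [pvIsActive, List.any_eq_true, hk, PySem.Set.empty]

-- ===== VERDICT (by name: the statement is the Claim_ definition above) =====
theorem build_category_filters_spec : Claim_equal_build_category_filters := by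
  intro projects _
  unfold Spec_build_category_filters build_category_filters build_category_filters_alt
  rw [pvCatFilters_eq]
  simp only [List.foldl_cons, List.foldl_nil, List.filter_cons, List.filter_nil, pv_key]
  rw [pv_active projects "individual" (by decide),
      pv_active projects "team" (by decide),
      pv_active projects "bachelors_thesis" (by decide),
      pv_active projects "masters_thesis" (by decide)]
  cases h1 : pvIsActive projects "individual" <;>
    cases h2 : pvIsActive projects "team" <;>
      cases h3 : pvIsActive projects "bachelors_thesis" <;>
        cases h4 : pvIsActive projects "masters_thesis" <;>
          simp
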